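-- pv_equiv track=rewrite | github.com/erwin00776/picnote | src/backend/dfs/master_point.py | meta_diff
-- ===== SOURCE A (Python) =====
-- def meta_diff(m1, m2, detail_cmp=False):
--     """
--     :param m1: compare hash
--     :param m2: base meta hash
--     :return: added/deleted
--     """
--     added, deleted = {}, m2.copy()
--     for md5id, val in m1.items():
--         if md5id not in m2:
--             added[md5id] = val
--         elif detail_cmp and (m1[md5id]['mtime'] != m2[md5id]['mtime'] or
--                              m1[md5id]['size'] != m2[md5id]['size']):
--             added[md5id] = val
--         else:
--             del deleted[md5id]
--     return added, deleted
-- ===== SOURCE B (Python) =====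
-- def meta_diff(m1, m2, detail_cmp=False):
--     def changed(a, b):
--         return a['mtime'] != b['mtime'] or a['size'] != b['size']
--     added = {k: v for k, v in m1.items()
--              if k not in m2 or (detail_cmp and changed(v, m2[k]))}
--     deleted = {k: v for k, v in m2.items()
--                if k not in m1 or (detail_cmp and changed(m1[k], v))}
--     return added, deleted
-- ===== Notes on version B (the rewrite author's own statement) =====
-- stated objective: simpler
-- what changed: Replaces A's single mutating pass (build added while copy-then-deleting from m2) by two independent comprehensions: added filters m1 directly, deleted filters m2 directly by membership/detail comparison against m1, with no copy and no deletion.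
import Mathlib
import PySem

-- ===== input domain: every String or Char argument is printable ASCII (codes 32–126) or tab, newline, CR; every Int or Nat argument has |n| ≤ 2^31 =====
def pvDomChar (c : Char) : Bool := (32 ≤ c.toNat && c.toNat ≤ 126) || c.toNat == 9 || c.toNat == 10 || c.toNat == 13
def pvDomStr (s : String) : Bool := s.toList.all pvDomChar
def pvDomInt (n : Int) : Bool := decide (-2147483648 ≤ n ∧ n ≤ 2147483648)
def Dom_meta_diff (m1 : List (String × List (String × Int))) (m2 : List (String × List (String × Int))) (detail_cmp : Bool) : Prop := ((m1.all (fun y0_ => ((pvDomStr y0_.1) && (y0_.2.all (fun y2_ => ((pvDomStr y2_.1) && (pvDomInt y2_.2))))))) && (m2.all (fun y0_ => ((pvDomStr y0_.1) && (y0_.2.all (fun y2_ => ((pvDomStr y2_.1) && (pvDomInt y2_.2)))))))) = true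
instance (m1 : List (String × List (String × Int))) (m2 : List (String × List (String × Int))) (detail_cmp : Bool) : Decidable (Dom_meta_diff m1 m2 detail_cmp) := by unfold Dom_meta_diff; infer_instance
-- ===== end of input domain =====

-- B replaces A's single mutating pass (build `added` while deleting from a copy of m2) by two
-- independent non-mutating filter passes over m1 and m2; objective: simpler (no copy, no deletion).

-- ===== PORT A =====
-- Python m[k] on an outer metadata dict; KeyError never reached inside Pre_meta_diff
def pvEntryA (m : List (String × List (String × Int))) (k : String) : List (String × Int) :=
  ((PySem.Dict.mk m).get? k).getD []
-- Python d['mtime'] / d['size']; KeyError excluded by Pre_meta_diff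
def pvFieldA (d : List (String × Int)) (f : String) : Int :=
  ((PySem.Dict.mk d).get? f).getD 0

def meta_diff (m1 : List (String × List (String × Int))) (m2 : List (String × List (String × Int))) (detail_cmp : Bool) : (List (String × List (String × Int))) × (List (String × List (String × Int))) :=
  -- added, deleted = {}, m2.copy(); then a single pass over m1.items() mutating both
  let r :=
    m1.foldl
      (fun (st : PySem.Dict String (List (String × Int)) × PySem.Dict String (List (String × Int)))
           (kv : String × List (String × Int)) =>
        if !(PySem.Dict.mk m2).contains kv.1 then
          (st.1.insert kv.1 kv.2, st.2)
        else if detail_cmp &&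
            (pvFieldA (pvEntryA m1 kv.1) "mtime" != pvFieldA (pvEntryA m2 kv.1) "mtime" ||
             pvFieldA (pvEntryA m1 kv.1) "size" != pvFieldA (pvEntryA m2 kv.1) "size") then
          (st.1.insert kv.1 kv.2, st.2)
        else
          (st.1, st.2.erase kv.1))
      (PySem.Dict.mk [], PySem.Dict.mk m2)
  (r.1.items, r.2.items)

-- ===== PORT B =====
-- Source B's `changed(a, b)`; reuses the d['f'] lookup helper pvFieldA (KeyError excluded by Pre_)
def pvChangedB (a b : List (String × Int)) : Bool :=
  (pvFieldA a "mtime" != pvFieldA b "mtime") || (pvFieldA a "size" != pvFieldA b "size")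

def meta_diff_alt (m1 : List (String × List (String × Int))) (m2 : List (String × List (String × Int))) (detail_cmp : Bool) : (List (String × List (String × Int))) × (List (String × List (String × Int))) :=
  (m1.filter (fun kv =>
      match (PySem.Dict.mk m2).get? kv.1 with
      | none => true
      | some v2 => detail_cmp && pvChangedB kv.2 v2),
   m2.filter (fun kv =>
      match (PySem.Dict.mk m1).get? kv.1 with
      | none => true
      | some v1 => detail_cmp && pvChangedB v1 kv.2))

-- ===== PRECONDITION & SPEC =====
-- Pre_ excludes (a) outer association lists with duplicate ids, which never encode a Python dict,
-- and (b) with detail_cmp, inputs where an entry present in both dicts lacks the 'mtime' key (or,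
-- when the mtimes are equal, the 'size' key), on which Python A raises KeyError.
def Pre_meta_diff (m1 : List (String × List (String × Int))) (m2 : List (String × List (String × Int))) (detail_cmp : Bool) : Prop :=
  (m1.map Prod.fst).Nodup ∧ (m2.map Prod.fst).Nodup ∧
  (detail_cmp = true → ∀ kv1 ∈ m1, ∀ kv2 ∈ m2, kv1.1 = kv2.1 →
    ((PySem.Dict.mk kv1.2).contains "mtime" = true ∧ (PySem.Dict.mk kv2.2).contains "mtime" = true ∧
     (((PySem.Dict.mk kv1.2).get? "mtime").getD 0 = ((PySem.Dict.mk kv2.2).get? "mtime").getD 0 →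
       (PySem.Dict.mk kv1.2).contains "size" = true ∧ (PySem.Dict.mk kv2.2).contains "size" = true)))
instance (m1 : List (String × List (String × Int))) (m2 : List (String × List (String × Int))) (detail_cmp : Bool) : Decidable (Pre_meta_diff m1 m2 detail_cmp) := by unfold Pre_meta_diff; infer_instance

def pvWitness_meta_diff : (List (String × List (String × Int))) × (List (String × List (String × Int))) × Bool :=
  ([("a", [("mtime", 1), ("size", 2)])], [("b", [("mtime", 1), ("size", 3)])], true)

def Spec_meta_diff (m1 : List (String × List (String × Int))) (m2 : List (String × List (String × Int))) (detail_cmp : Bool) (out : (List (String × List (String × Int))) × (List (String × List (String × Int)))) : Prop := out = meta_diff_alt m1 m2 detail_cmp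
instance (m1 : List (String × List (String × Int))) (m2 : List (String × List (String × Int))) (detail_cmp : Bool) (out : (List (String × List (String × Int))) × (List (String × List (String × Int)))) : Decidable (Spec_meta_diff m1 m2 detail_cmp out) := by unfold Spec_meta_diff; infer_instance

-- ===== CLAIM (what is proved, stated in full; the proofs are below) =====
def Claim_equal_meta_diff : Prop := ∀ (m1 : List (String × List (String × Int))) (m2 : List (String × List (String × Int))) (detail_cmp : Bool), Dom_meta_diff m1 m2 detail_cmp → Pre_meta_diff m1 m2 detail_cmp → Spec_meta_diff m1 m2 detail_cmp (meta_diff m1 m2 detail_cmp)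

-- ===== LEMMAS AND PROOFS =====

-- the Boolean condition under which A's loop body inserts into `added` (and does not erase)
def pvAddA (m1 m2 : List (String × List (String × Int))) (detail_cmp : Bool)
    (kv : String × List (String × Int)) : Bool :=
  !(PySem.Dict.mk m2).contains kv.1 ||
    (detail_cmp &&
      (pvFieldA (pvEntryA m1 kv.1) "mtime" != pvFieldA (pvEntryA m2 kv.1) "mtime" ||
       pvFieldA (pvEntryA m1 kv.1) "size" != pvFieldA (pvEntryA m2 kv.1) "size"))

-- two elements of a key-Nodup association list with the same key coincide
theorem pv_key_inj {α β : Type} (l : List (α × β)) (h : (l.map Prod.fst).Nodup)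
    (a b : α × β) (ha : a ∈ l) (hb : b ∈ l) (hk : a.1 = b.1) : a = b := by
  induction l with
  | nil => cases ha
  | cons x xs ih =>
    simp only [List.map_cons, List.nodup_cons] at h
    rcases List.mem_cons.mp ha with rfl | ha' <;> rcases List.mem_cons.mp hb with rfl | hb'
    · rfl
    · exact absurd (hk ▸ List.mem_map_of_mem hb') h.1
    · exact absurd (hk ▸ List.mem_map_of_mem ha') h.1
    · exact ih h.2 ha' hb'

-- A's loop, split: the `added` side appends the kept pairs, the `deleted` side filters m2
theorem pv_loopA (m1 m2 : List (String × List (String × Int))) (detail_cmp : Bool)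
    (l : List (String × List (String × Int)))
    (ad dl : PySem.Dict String (List (String × Int)))
    (hfresh : ∀ kv ∈ l, ad.contains kv.1 = false)
    (hnd : (l.map Prod.fst).Nodup) :
    l.foldl
      (fun (st : PySem.Dict String (List (String × Int)) × PySem.Dict String (List (String × Int)))
           (kv : String × List (String × Int)) =>
        if !(PySem.Dict.mk m2).contains kv.1 then
          (st.1.insert kv.1 kv.2, st.2)
        else if detail_cmp &&
            (pvFieldA (pvEntryA m1 kv.1) "mtime" != pvFieldA (pvEntryA m2 kv.1) "mtime" ||
             pvFieldA (pvEntryA m1 kv.1) "size" != pvFieldA (pvEntryA m2 kv.1) "size") then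
          (st.1.insert kv.1 kv.2, st.2)
        else
          (st.1, st.2.erase kv.1))
      (ad, dl) =
    (PySem.Dict.mk (ad.items ++ l.filter (pvAddA m1 m2 detail_cmp)),
     PySem.Dict.mk (dl.items.filter
       (fun p => l.all (fun kv => pvAddA m1 m2 detail_cmp kv || !(p.1 == kv.1))))) := by
  induction l generalizing ad dl with
  | nil => simp
  | cons kv l ih =>
    simp only [List.map_cons, List.nodup_cons] at hnd
    have hk : ∀ kv' ∈ l, kv.1 ≠ kv'.1 := by
      intro kv' h' heq
      exact hnd.1 (heq ▸ List.mem_map_of_mem h')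
    simp only [List.foldl_cons]
    by_cases hA : pvAddA m1 m2 detail_cmp kv = true
    · -- insert branch
      have hstep : (if !(PySem.Dict.mk m2).contains kv.1 then
          (ad.insert kv.1 kv.2, dl)
        else if detail_cmp &&
            (pvFieldA (pvEntryA m1 kv.1) "mtime" != pvFieldA (pvEntryA m2 kv.1) "mtime" ||
             pvFieldA (pvEntryA m1 kv.1) "size" != pvFieldA (pvEntryA m2 kv.1) "size") then
          (ad.insert kv.1 kv.2, dl)
        else (ad, dl.erase kv.1)) = (ad.insert kv.1 kv.2, dl) := by
        unfold pvAddA at hA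
        cases hc : (!(PySem.Dict.mk m2).contains kv.1) with
        | true => simp only [if_true]
        | false =>
          rw [hc] at hA
          simp only [Bool.false_or] at hA
          simp only [hA, Bool.false_eq_true, if_false, if_true]
      rw [hstep]
      have hins : ad.insert kv.1 kv.2 = PySem.Dict.mk (ad.items ++ [(kv.1, kv.2)]) := by
        simp [PySem.Dict.insert, hfresh kv (List.mem_cons_self)]
      rw [hins]
      rw [ih (PySem.Dict.mk (ad.items ++ [(kv.1, kv.2)])) dl ?_ hnd.2]
      · simp only [Prod.mk.injEq, PySem.Dict.mk.injEq]
        refine ⟨?_, ?_⟩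
        · simp [hA]
        · simp only [List.all_cons, hA, Bool.true_or, Bool.true_and]
      · intro kv' h'
        have := hfresh kv' (List.mem_cons_of_mem _ h')
        simp [PySem.Dict.contains] at this ⊢
        exact ⟨this, fun e => (hk kv' h' e)⟩
    · -- erase branch
      have hA' := Bool.eq_false_iff.mpr hA
      have hstep : (if !(PySem.Dict.mk m2).contains kv.1 then
          (ad.insert kv.1 kv.2, dl)
        else if detail_cmp &&
            (pvFieldA (pvEntryA m1 kv.1) "mtime" != pvFieldA (pvEntryA m2 kv.1) "mtime" ||
             pvFieldA (pvEntryA m1 kv.1) "size" != pvFieldA (pvEntryA m2 kv.1) "size") then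
          (ad.insert kv.1 kv.2, dl)
        else (ad, dl.erase kv.1)) = (ad, dl.erase kv.1) := by
        unfold pvAddA at hA'
        simp only [Bool.or_eq_false_iff] at hA'
        simp only [hA'.1, hA'.2, Bool.false_eq_true, if_false]
      rw [hstep]
      rw [ih ad (dl.erase kv.1) (fun kv' h' => hfresh kv' (List.mem_cons_of_mem _ h')) hnd.2]
      simp only [Prod.mk.injEq, PySem.Dict.mk.injEq]
      refine ⟨?_, ?_⟩
      · simp [hA']
      · show (PySem.Dict.erase dl kv.1).items.filter _ = _
        simp only [PySem.Dict.erase, List.filter_filter]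
        congr 1
        funext p
        simp only [List.all_cons, hA', Bool.false_or]
        rw [Bool.and_comm]

-- get? on a key-Nodup association list returns the member's value
theorem pv_get?_mem (m : List (String × List (String × Int))) (hnd : (m.map Prod.fst).Nodup)
    (kv : String × List (String × Int)) (h : kv ∈ m) :
    (PySem.Dict.mk m).get? kv.1 = some kv.2 :=
  PySem.Dict.get?_of_mem_items (d := PySem.Dict.mk m) (by simpa using h)
    (by simpa [PySem.Dict.keys] using hnd)

theorem meta_diff_spec' (m1 m2 : List (String × List (String × Int))) (detail_cmp : Bool)
    (h1 : (m1.map Prod.fst).Nodup) (h2 : (m2.map Prod.fst).Nodup) :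
    meta_diff m1 m2 detail_cmp = meta_diff_alt m1 m2 detail_cmp := by
  unfold meta_diff
  rw [pv_loopA m1 m2 detail_cmp m1 (PySem.Dict.mk []) (PySem.Dict.mk m2)
      (by intro kv _; simp [PySem.Dict.contains]) h1]
  unfold meta_diff_alt
  simp only [Prod.mk.injEq]
  constructor
  · -- added component
    show [] ++ m1.filter (pvAddA m1 m2 detail_cmp) = _
    rw [List.nil_append]
    apply List.filter_congr
    intro kv hmem
    cases hg : (PySem.Dict.mk m2).get? kv.1 with
    | none =>
      have hc : (PySem.Dict.mk m2).contains kv.1 = false := by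
        rw [PySem.Dict.contains_eq_isSome_get?, hg]; rfl
      simp [pvAddA, hc]
    | some v2 =>
      have hc : (PySem.Dict.mk m2).contains kv.1 = true := by
        rw [PySem.Dict.contains_eq_isSome_get?, hg]; rfl
      have e1 : pvEntryA m1 kv.1 = kv.2 := by
        simp [pvEntryA, pv_get?_mem m1 h1 kv hmem]
      have e2 : pvEntryA m2 kv.1 = v2 := by simp [pvEntryA, hg]
      simp only [pvAddA, hc, Bool.not_true, Bool.false_or, e1, e2]
      rfl
  · -- deleted component
    show (PySem.Dict.mk m2).items.filter _ = _
    apply List.filter_congr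
    intro p hmem
    cases hg : (PySem.Dict.mk m1).get? p.1 with
    | none =>
      have hnm : ∀ kv ∈ m1, p.1 ≠ kv.1 := by
        intro kv hkv he
        have : (PySem.Dict.mk m1).get? kv.1 = some kv.2 := pv_get?_mem m1 h1 kv hkv
        rw [← he, hg] at this; cases this
      simp only [List.all_eq_true]
      intro x hx
      have : (p.1 == x.1) = false := beq_eq_false_iff_ne.mpr (hnm x hx)
      simp [this]
    | some v1 =>
      have hpv1 : (p.1, v1) ∈ m1 := by
        have := PySem.Dict.mem_items_of_get?_eq_some (PySem.Dict.mk m1) hg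
        simpa using this
      have hcont : (PySem.Dict.mk m2).contains p.1 = true := by
        simp only [PySem.Dict.contains, List.any_eq_true]
        exact ⟨p, hmem, by simp⟩
      have e1 : pvEntryA m1 p.1 = v1 := by simp [pvEntryA, hg]
      have e2 : pvEntryA m2 p.1 = p.2 := by
        simp [pvEntryA, pv_get?_mem m2 h2 p hmem]
      have hAp : pvAddA m1 m2 detail_cmp (p.1, v1) = (detail_cmp && pvChangedB v1 p.2) := by
        simp only [pvAddA, hcont, Bool.not_true, Bool.false_or, e1, e2]
        rfl
      show _ = (detail_cmp && pvChangedB v1 p.2)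
      rw [← hAp]
      cases hval : pvAddA m1 m2 detail_cmp (p.1, v1) with
      | true =>
        simp only [List.all_eq_true]
        intro x hx
        by_cases hx1 : p.1 = x.1
        · have : x = (p.1, v1) := pv_key_inj m1 h1 x (p.1, v1) hx hpv1 (by simp [hx1])
          rw [this, hval]; rfl
        · have : (p.1 == x.1) = false := beq_eq_false_iff_ne.mpr hx1
          simp [this]
      | false =>
        simp only [List.all_eq_false]
        exact ⟨(p.1, v1), hpv1, by simp [hval]⟩

-- ===== VERDICT (by name: the statement is the Claim_ definition above) =====
theorem meta_diff_spec : Claim_equal_meta_diff := by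
  intro m1 m2 detail_cmp _ hpre
  exact meta_diff_spec' m1 m2 detail_cmp hpre.1 hpre.2.1
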